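-- pv_equiv track=rewrite | github.com/sirbrialliance/ttsjigsawjoin | src/making pieces/create_pieces.py | spiralizer
-- ===== SOURCE A (Python) =====
-- def spiralizer(max_dist):
--     # returns an iterator of x,y values that spiral around (0,0) starting at (0,0)
--     # up to a maximum integer distance of max_dist
--     dist = 0
--     direc = 4
--     count = 0
--     directions = [(0,1),(1,0),(0,-1),(-1,0)]
--     x = y = 0
--     while dist <= max_dist:
--         yield x, y
--         if direc >= 4:
--             dist += 1
--             count = 0
--             direc = 0
--             x = y = -dist
--         x += directions[direc][0]
--         y += directions[direc][1]
--         count += 1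
--         if count == dist * 2:
--             direc += 1
--             count = 0
-- ===== SOURCE B (Python) =====
-- def spiralizer(max_dist):
--     # ring-by-ring spiral: center, then for each ring d the four edges in A's order
--     if 0 <= max_dist:
--         yield 0, 0
--     d = 1
--     while d <= max_dist:
--         for y in range(-d + 1, d + 1):
--             yield -d, y
--         for x in range(-d + 1, d + 1):
--             yield x, d
--         for y in range(d - 1, -d - 1, -1):
--             yield d, y
--         for x in range(d - 1, -d - 1, -1):
--             yield x, -d
--         d += 1
-- ===== Notes on version B (the rewrite author's own statement) =====
-- stated objective: alternative
-- what changed: Replaces A's direction-index/counter state machine with nested ring-and-edge loops: yield (0,0), then for each ring d emit four explicit range() edge loops in A's spiral order.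
import Mathlib
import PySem

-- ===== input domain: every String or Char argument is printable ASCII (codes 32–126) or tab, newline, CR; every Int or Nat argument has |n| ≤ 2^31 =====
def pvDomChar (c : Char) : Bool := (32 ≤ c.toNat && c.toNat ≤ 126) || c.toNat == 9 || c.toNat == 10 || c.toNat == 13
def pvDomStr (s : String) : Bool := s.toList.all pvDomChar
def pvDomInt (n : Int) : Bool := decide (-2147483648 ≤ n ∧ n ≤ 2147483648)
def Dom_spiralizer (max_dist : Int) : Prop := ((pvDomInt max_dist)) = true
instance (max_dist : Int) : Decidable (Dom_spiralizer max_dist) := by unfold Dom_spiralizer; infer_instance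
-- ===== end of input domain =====

-- B replaces A's direction-index/counter state machine by explicit ring-and-edge range loops (objective: alternative, same cost).
-- (A is a generator; both ports return the full list of yielded points.)

-- ===== PORT A =====
def pvDirs : List (Int × Int) := [(0,1),(1,0),(0,-1),(-1,0)]

-- the loop body after the yield: reset at direc>=4, move one step, bump count, turn when count hits dist*2
-- (directions[direc] is always indexed with direc in 0..3 here, so the .getD default is never used)
def pvNext (dist direc count x y : Int) : Int × Int × Int × Int × Int :=
  let (dist1, count1, direc1, x1, y1) :=
    if 4 ≤ direc then (dist+1, (0:Int), (0:Int), -(dist+1), -(dist+1)) else (dist, count, direc, x, y)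
  let dxy := (PySem.List.pyGet? pvDirs direc1).getD (0, 0)
  let x2 := x1 + dxy.1
  let y2 := y1 + dxy.2
  let count2 := count1 + 1
  if count2 = dist1 * 2 then (dist1, direc1 + 1, 0, x2, y2) else (dist1, direc1, count2, x2, y2)

-- the while loop, made total with fuel (the chosen fuel is proved sufficient in the lemmas below)
def pvLoopA (md : Int) : Nat → Int → Int → Int → Int → Int → List (Int × Int)
  | 0, _, _, _, _, _ => []
  | f+1, dist, direc, count, x, y =>
    if dist ≤ md then
      (x, y) ::
        (let n := pvNext dist direc count x y
         pvLoopA md f n.1 n.2.1 n.2.2.1 n.2.2.2.1 n.2.2.2.2)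
    else []

def spiralizer (max_dist : Int) : List (Int × Int) :=
  pvLoopA max_dist (1 + 8 * (max_dist.toNat + 1) * (max_dist.toNat + 1)) 0 4 0 0 0

-- ===== PORT B =====
def pvRingB (d : Int) : List (Int × Int) :=
  (PySem.List.pyRange (-d+1) (d+1) 1).map (fun y => (-d, y)) ++
  (PySem.List.pyRange (-d+1) (d+1) 1).map (fun x => (x, d)) ++
  (PySem.List.pyRange (d-1) (-d-1) (-1)).map (fun y => (d, y)) ++
  (PySem.List.pyRange (d-1) (-d-1) (-1)).map (fun x => (x, -d))

def pvRingsFrom (md d : Int) : List (Int × Int) :=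
  if h : d ≤ md then pvRingB d ++ pvRingsFrom md (d+1) else []
termination_by (md + 1 - d).toNat
decreasing_by omega

def spiralizer_alt (max_dist : Int) : List (Int × Int) :=
  (if 0 ≤ max_dist then [((0:Int), (0:Int))] else []) ++ pvRingsFrom max_dist 1

-- ===== PRECONDITION & SPEC =====
def Spec_spiralizer (max_dist : Int) (out : List (Int × Int)) : Prop := out = spiralizer_alt max_dist
instance (max_dist : Int) (out : List (Int × Int)) : Decidable (Spec_spiralizer max_dist out) := by unfold Spec_spiralizer; infer_instance

-- ===== CLAIM (what is proved, stated in full; the proofs are below) =====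
def Claim_equal_spiralizer : Prop := ∀ (max_dist : Int), Dom_spiralizer max_dist → Spec_spiralizer max_dist (spiralizer max_dist)

-- ===== LEMMAS AND PROOFS =====

lemma pvLoopA_stop (md : Int) (f : Nat) (dist direc count x y : Int) (h : ¬ dist ≤ md) :
    pvLoopA md f dist direc count x y = [] := by
  cases f <;> simp [pvLoopA, h]

lemma pvLoopA_succ (md : Int) (f : Nat) (dist direc count x y : Int) (h : dist ≤ md) :
    pvLoopA md (f+1) dist direc count x y =
      (x, y) ::
        (let n := pvNext dist direc count x y
         pvLoopA md f n.1 n.2.1 n.2.2.1 n.2.2.2.1 n.2.2.2.2) := by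
  simp [pvLoopA, h]

lemma pvNext_reset (d c x y : Int) (h : 0 ≤ d) :
    pvNext d 4 c x y = (d+1, 0, 1, -(d+1), -(d+1)+1) := by
  simp [pvNext, pvDirs, PySem.List.pyGet?, PySem.List.pyIdx?]
  omega

lemma pvNext_move (d direc c x y dx dy : Int) (h4 : direc < 4)
    (hd : (PySem.List.pyGet? pvDirs direc).getD (0,0) = (dx, dy)) (hne : c + 1 ≠ d * 2) :
    pvNext d direc c x y = (d, direc, c+1, x+dx, y+dy) := by
  simp only [pvNext, if_neg (by omega : ¬ 4 ≤ direc), hd, if_neg hne]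

lemma pvNext_turn (d direc c x y dx dy : Int) (h4 : direc < 4)
    (hd : (PySem.List.pyGet? pvDirs direc).getD (0,0) = (dx, dy)) (heq : c + 1 = d * 2) :
    pvNext d direc c x y = (d, direc+1, 0, x+dx, y+dy) := by
  simp only [pvNext, if_neg (by omega : ¬ 4 ≤ direc), hd, if_pos heq]

-- one edge of a ring: from a mid-edge state, emit the remaining points of this edge and turn
lemma pv_edge (md : Int) : ∀ (n f : Nat) (d direc c x y dx dy : Int),
    d ≤ md → 1 ≤ d → 0 ≤ direc → direc ≤ 3 → 0 ≤ c → c < 2*d →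
    ((PySem.List.pyGet? pvDirs direc).getD (0,0)) = (dx, dy) →
    (2*d - c).toNat = n →
    pvLoopA md (n + f) d direc c x y
      = (List.range n).map (fun i : Nat => (x + (i:Int)*dx, y + (i:Int)*dy))
        ++ pvLoopA md f d (direc+1) 0 (x + (n:Int)*dx) (y + (n:Int)*dy) := by
  intro n
  induction n with
  | zero => intro f d direc c x y dx dy h1 h2 h3 h4 h5 h6 h7 h8; omega
  | succ m ih =>
    intro f d direc c x y dx dy h1 h2 h3 h4 h5 h6 h7 h8
    have hsh : m + 1 + f = (m + f) + 1 := by omega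
    rw [hsh, pvLoopA_succ md (m+f) d direc c x y h1]
    by_cases hm : m = 0
    · subst hm
      have hceq : c + 1 = d * 2 := by omega
      rw [pvNext_turn d direc c x y dx dy (by omega) h7 hceq]
      simp
    · have hne : c + 1 ≠ d * 2 := by omega
      rw [pvNext_move d direc c x y dx dy (by omega) h7 hne]
      simp only
      rw [ih f d direc (c+1) (x+dx) (y+dy) dx dy h1 h2 h3 h4 (by omega) (by omega) h7 (by omega)]
      rw [List.range_succ_eq_map, List.map_cons, List.map_map]
      simp only [Nat.cast_zero, zero_mul, add_zero, List.cons_append]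
      have hxm : x + dx + (m:Int)*dx = x + (((m+1 : Nat)):Int)*dx := by push_cast; ring
      have hym : y + dy + (m:Int)*dy = y + (((m+1 : Nat)):Int)*dy := by push_cast; ring
      rw [hxm, hym]
      congr 2
      exact List.map_congr_left (fun i _ => by
        simp only [Function.comp_apply, Prod.mk.injEq]
        push_cast
        constructor <;> ring)

lemma pv_reset (md : Int) (f : Nat) (d c x y : Int) (h0 : 0 ≤ d) (h : d ≤ md) :
    pvLoopA md (1 + f) d 4 c x y = (x, y) :: pvLoopA md f (d+1) 0 1 (-(d+1)) (-(d+1)+1) := by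
  rw [Nat.add_comm, pvLoopA_succ md f d 4 c x y h, pvNext_reset d c x y h0]

lemma pvSegCons (n0 : Nat) (x y dx dy : Int) :
    (List.range (n0+1)).map (fun i : Nat => (x + (i:Int)*dx, y + (i:Int)*dy))
      = (x, y) :: (List.range n0).map (fun i : Nat => ((x+dx) + (i:Int)*dx, (y+dy) + (i:Int)*dy)) := by
  rw [List.range_succ_eq_map, List.map_cons, List.map_map]
  simp only [Nat.cast_zero, zero_mul, add_zero]
  congr 1
  exact List.map_congr_left (fun i _ => by
    simp only [Function.comp_apply, Prod.mk.injEq]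
    push_cast
    constructor <;> ring)

lemma pvB0 (d : Int) (hd : 1 ≤ d) (n0 : Nat) (h0 : (n0:Int) = 2*d-1) :
    (PySem.List.pyRange (-d+1) (d+1) 1).map (fun y => ((-d : Int), y))
      = (List.range n0).map (fun i : Nat => (-d + (i:Int)*0, (-d+1) + (i:Int)*1)) ++ [((-d : Int), d)] := by
  rw [PySem.List.pyRange_one, show ((d+1)-(-d+1)).toNat = n0+1 from by omega, List.map_map,
      List.range_succ, List.map_append]
  congr 1
  · exact List.map_congr_left (fun i _ => by
      simp only [Function.comp_apply, Prod.mk.injEq]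
      constructor <;> ring)
  · simp [Prod.ext_iff]
    omega

lemma pvB1 (d : Int) (hd : 1 ≤ d) (n0 : Nat) (h0 : (n0:Int) = 2*d-1) :
    (PySem.List.pyRange (-d+1) (d+1) 1).map (fun x => (x, (d : Int)))
      = (List.range n0).map (fun i : Nat => ((-d+1) + (i:Int), (d : Int))) ++ [((d : Int), (d : Int))] := by
  rw [PySem.List.pyRange_one, show ((d+1)-(-d+1)).toNat = n0+1 from by omega, List.map_map,
      List.range_succ, List.map_append]
  congr 1
  simp [Prod.ext_iff]
  omega

lemma pvB2 (d : Int) (hd : 1 ≤ d) (n0 : Nat) (h0 : (n0:Int) = 2*d-1) :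
    (PySem.List.pyRange (d-1) (-d-1) (-1)).map (fun y => ((d : Int), y))
      = (List.range n0).map (fun i : Nat => ((d : Int), (d-1) - (i:Int))) ++ [((d : Int), -d)] := by
  rw [PySem.List.pyRange_neg_one, show ((d-1)-(-d-1)).toNat = n0+1 from by omega, List.map_map,
      List.range_succ, List.map_append]
  congr 1
  simp [Prod.ext_iff]
  omega

lemma pvB3 (d : Int) (hd : 1 ≤ d) (n0 : Nat) (h0 : (n0:Int) = 2*d-1) :
    (PySem.List.pyRange (d-1) (-d-1) (-1)).map (fun x => (x, (-d : Int)))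
      = (List.range n0).map (fun i : Nat => ((d-1) - (i:Int), (-d : Int))) ++ [((-d : Int), -d)] := by
  rw [PySem.List.pyRange_neg_one, show ((d-1)-(-d-1)).toNat = n0+1 from by omega, List.map_map,
      List.range_succ, List.map_append]
  congr 1
  simp [Prod.ext_iff]
  omega

-- the points A emits during ring d equal B's four edge lists for ring d
lemma pv_ringAB (d : Int) (hd : 1 ≤ d) (n0 n1 : Nat) (h0 : (n0:Int) = 2*d-1) (h1 : (n1:Int) = 2*d)
    (L : List (Int × Int)) :
    (List.range n0).map (fun i : Nat => (-d + (i:Int)*0, (-d+1) + (i:Int)*1))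
      ++ ((List.range n1).map (fun i : Nat => (-d + (i:Int)*1, d + (i:Int)*0))
      ++ ((List.range n1).map (fun i : Nat => (d + (i:Int)*0, d + (i:Int)*(-1)))
      ++ ((List.range n1).map (fun i : Nat => (d + (i:Int)*(-1), -d + (i:Int)*0))
      ++ (((-d : Int), (-d : Int)) :: L))))
      = pvRingB d ++ L := by
  have hn : n1 = n0 + 1 := by omega
  subst hn
  rw [pvRingB, pvB0 d hd n0 h0, pvB1 d hd n0 h0, pvB2 d hd n0 h0, pvB3 d hd n0 h0]
  simp only [pvSegCons]
  simp only [List.append_assoc, List.cons_append, List.nil_append]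
  rw [show List.map (fun i : Nat => (-d + 1 + (i:Int) * 1, d + 0 + (i:Int) * 0)) (List.range n0)
        = List.map (fun i : Nat => (-d + 1 + (i:Int), (d:Int))) (List.range n0) from
      List.map_congr_left (fun i _ => by simp only [Prod.mk.injEq]; constructor <;> ring)]
  rw [show List.map (fun i : Nat => (d + 0 + (i:Int) * 0, d + -1 + (i:Int) * -1)) (List.range n0)
        = List.map (fun i : Nat => ((d:Int), d - 1 - (i:Int))) (List.range n0) from
      List.map_congr_left (fun i _ => by simp only [Prod.mk.injEq]; constructor <;> ring)]
  rw [show List.map (fun i : Nat => (d + -1 + (i:Int) * -1, -d + 0 + (i:Int) * 0)) (List.range n0)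
        = List.map (fun i : Nat => (d - 1 - (i:Int), (-d:Int))) (List.range n0) from
      List.map_congr_left (fun i _ => by simp only [Prod.mk.injEq]; constructor <;> ring)]

lemma pv_main (md : Int) : ∀ (k : Nat) (d : Int) (f : Nat), 1 ≤ d →
    (md + 1 - d).toNat = k → k * (8 * (md.toNat + 1)) ≤ f →
    pvLoopA md f d 0 1 (-d) (-d+1) = pvRingsFrom md d := by
  intro k
  induction k with
  | zero =>
    intro d f h1 hk hf
    have hdm : ¬ d ≤ md := by omega
    rw [pvLoopA_stop md f _ _ _ _ _ hdm, pvRingsFrom, dif_neg hdm]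
  | succ k ih =>
    intro d f h1 hk hf
    have hdm : d ≤ md := by omega
    rw [Nat.succ_mul] at hf
    have hdtoNat : d.toNat ≤ md.toNat := by omega
    set n0 := (2*d - 1).toNat with hn0
    set n1 := (2*d).toNat with hn1
    have h0 : (n0:Int) = 2*d-1 := by omega
    have h1' : (n1:Int) = 2*d := by omega
    have hfuel : 8 * d.toNat ≤ f := by omega
    set f' := f - 8 * d.toNat with hf'
    have hsplit : f = n0 + (n1 + (n1 + (n1 + (1 + f')))) := by omega
    rw [hsplit]
    rw [pv_edge md n0 _ d 0 1 (-d) (-d+1) 0 1 hdm h1 le_rfl (by omega) (by omega) (by omega)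
        (by decide) (by omega)]
    rw [show ((0:Int)+1) = 1 from by norm_num,
        show (-d + (n0:Int)*0) = -d from by ring,
        show ((-d+1) + (n0:Int)*1) = d from by rw [h0]; ring]
    rw [pv_edge md n1 _ d 1 0 (-d) d 1 0 hdm h1 (by omega) (by omega) le_rfl (by omega)
        (by decide) (by omega)]
    rw [show ((1:Int)+1) = 2 from by norm_num,
        show (-d + (n1:Int)*1) = d from by rw [h1']; ring,
        show (d + (n1:Int)*0) = d from by ring]
    rw [pv_edge md n1 _ d 2 0 d d 0 (-1) hdm h1 (by omega) (by omega) le_rfl (by omega)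
        (by decide) (by omega)]
    rw [show ((2:Int)+1) = 3 from by norm_num,
        show (d + (n1:Int)*0) = d from by ring,
        show (d + (n1:Int)*(-1)) = -d from by rw [h1']; ring]
    rw [pv_edge md n1 _ d 3 0 d (-d) (-1) 0 hdm h1 (by omega) (by omega) le_rfl (by omega)
        (by decide) (by omega)]
    rw [show ((3:Int)+1) = 4 from by norm_num,
        show (d + (n1:Int)*(-1)) = -d from by rw [h1']; ring,
        show (-d + (n1:Int)*0) = -d from by ring]
    rw [pv_reset md f' d 0 (-d) (-d) (by omega) hdm]
    rw [ih (d+1) f' (by omega) (by omega) (by omega)]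
    conv_rhs => rw [pvRingsFrom]
    rw [dif_pos hdm]
    exact pv_ringAB d h1 n0 n1 h0 h1' (pvRingsFrom md (d+1))

-- ===== VERDICT (by name: the statement is the Claim_ definition above) =====
theorem spiralizer_spec : Claim_equal_spiralizer := by
  intro md _
  unfold Spec_spiralizer spiralizer spiralizer_alt
  by_cases h : 0 ≤ md
  · rw [if_pos h]
    rw [pv_reset md (8 * (md.toNat + 1) * (md.toNat + 1)) 0 0 0 0 le_rfl h]
    rw [show ((0:Int)+1) = 1 from by norm_num]
    have hF : md.toNat * (8 * (md.toNat + 1)) ≤ 8 * (md.toNat + 1) * (md.toNat + 1) := by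
      calc md.toNat * (8 * (md.toNat + 1)) ≤ (md.toNat + 1) * (8 * (md.toNat + 1)) :=
            Nat.mul_le_mul_right _ (Nat.le_succ _)
        _ = 8 * (md.toNat + 1) * (md.toNat + 1) := by ring
    rw [pv_main md md.toNat 1 _ le_rfl (by omega) hF]
    simp
  · rw [if_neg h, pvLoopA_stop md _ 0 4 0 0 0 (by omega)]
    rw [show pvRingsFrom md 1 = [] from by rw [pvRingsFrom, dif_neg (by omega)]]
    simp
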